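-- pv_equiv track=rewrite | github.com/cacruz/eviz-dev | eviz/lib/autoviz/utils.py | get_subplot_shape
-- ===== SOURCE A (Python) =====
-- import math
--
-- def get_subplot_shape(n: int):
--     if n <= 3:
--         return n, 1
--
--     # Try to make the layout as square as possible
--     for cols in range(1, n + 1):
--         rows = math.ceil(n / cols)
--         if rows * cols >= n and abs(rows - cols) <= 1:
--             return rows, cols
--
--     # Fallback to 1 row if no better fit (shouldn't happen with 2 <= n <= 12)
--     return 1, n
-- ===== SOURCE B (Python) =====
-- import math
--
-- def get_subplot_shape(n: int):
--     if n <= 3: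
--         return n, 1
--     # smallest cols with cols*(cols+1) >= n, via integer sqrt
--     s = math.isqrt(4 * n + 1)
--     cols = s // 2
--     if cols * (cols + 1) < n:
--         cols += 1
--     rows = -(-n // cols)  # ceil(n / cols)
--     return rows, cols
-- ===== Notes on version B (the rewrite author's own statement) =====
-- stated objective: faster
-- what changed: Replaced the linear scan over candidate column counts with a closed-form integer-sqrt computation of the smallest cols with cols*(cols+1) >= n, then rows = ceil(n/cols).
import Mathlib
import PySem

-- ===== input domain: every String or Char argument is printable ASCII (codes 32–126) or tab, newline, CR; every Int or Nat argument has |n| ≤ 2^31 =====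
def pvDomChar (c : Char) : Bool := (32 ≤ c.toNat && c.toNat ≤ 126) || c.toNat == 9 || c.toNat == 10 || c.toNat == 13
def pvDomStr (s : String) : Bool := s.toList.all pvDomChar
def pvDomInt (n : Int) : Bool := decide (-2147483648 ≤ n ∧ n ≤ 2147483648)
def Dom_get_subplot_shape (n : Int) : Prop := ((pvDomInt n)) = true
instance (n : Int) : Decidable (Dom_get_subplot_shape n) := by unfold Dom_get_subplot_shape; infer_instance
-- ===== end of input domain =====

-- B replaces A's linear scan over candidate column counts with a closed-form
-- integer-sqrt computation of the same (rows, cols); objective: faster.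

-- ===== PORT A =====
-- math.ceil(n / cols) with 1 ≤ cols and |n| ≤ 2^31 is exact ceiling division,
-- ported as -((-n) // cols) with Python floor division.
def pvCeilA (n cols : Int) : Int := -(PySem.Int.floordiv (-n) cols)

-- the for-loop over range(1, n+1); fuel = number of remaining iterations
def pvLoopA (n : Int) (cols : Int) (fuel : Nat) : Int × Int :=
  match fuel with
  | 0 => (1, n)  -- loop exhausted: fallback `return 1, n`
  | fuel + 1 =>
    let rows := pvCeilA n cols
    if rows * cols ≥ n ∧ |rows - cols| ≤ 1 then (rows, cols)
    else pvLoopA n (cols + 1) fuel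

def get_subplot_shape (n : Int) : Int × Int :=
  if n ≤ 3 then (n, 1)
  else pvLoopA n 1 n.toNat

-- ===== PORT B =====
def get_subplot_shape_alt (n : Int) : Int × Int :=
  if n ≤ 3 then (n, 1)
  else
    -- math.isqrt(4*n+1); argument is positive here
    let s : Int := (Nat.sqrt (4 * n + 1).toNat : Int)
    let cols0 := PySem.Int.floordiv s 2
    let cols := if cols0 * (cols0 + 1) < n then cols0 + 1 else cols0
    let rows := -(PySem.Int.floordiv (-n) cols)  -- ceil(n / cols)
    (rows, cols)

-- ===== PRECONDITION & SPEC =====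
def Spec_get_subplot_shape (n : Int) (out : Int × Int) : Prop := out = get_subplot_shape_alt n
instance (n : Int) (out : Int × Int) : Decidable (Spec_get_subplot_shape n out) := by unfold Spec_get_subplot_shape; infer_instance

-- ===== CLAIM (what is proved, stated in full; the proofs are below) =====
def Claim_equal_get_subplot_shape : Prop := ∀ (n : Int), Dom_get_subplot_shape n → Spec_get_subplot_shape n (get_subplot_shape n)

-- ===== LEMMAS AND PROOFS =====

-- ceiling division bracket: r = ceil(n/c) for 0 < c
theorem pvCeilA_bracket (n c : Int) (hc : 0 < c) :
    (pvCeilA n c - 1) * c < n ∧ n ≤ pvCeilA n c * c := by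
  have h := (PySem.Int.neg_floordiv_neg_eq_iff_of_pos (a := n) (b := c)
    (q := pvCeilA n c) hc).mp rfl
  exact h

-- the loop returns the FIRST cols satisfying the test
theorem pvLoopA_spec (n c : Int)
    (hP : pvCeilA n c * c ≥ n ∧ |pvCeilA n c - c| ≤ 1) :
    ∀ (fuel : Nat) (cols : Int),
      (∀ k, cols ≤ k → k < c → ¬ (pvCeilA n k * k ≥ n ∧ |pvCeilA n k - k| ≤ 1)) →
      cols ≤ c → c - cols < (fuel : Int) →
      pvLoopA n cols fuel = (pvCeilA n c, c) := by
  intro fuel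
  induction fuel with
  | zero => intro cols _ hlo hfuel; omega
  | succ fuel ih =>
    intro cols hmin hlo hfuel
    by_cases hcc : cols = c
    · subst hcc
      simp only [pvLoopA, if_pos hP]
    · have hlt : cols < c := lt_of_le_of_ne hlo hcc
      have hnot := hmin cols le_rfl hlt
      simp only [pvLoopA, if_neg hnot]
      exact ih (cols + 1) (fun k hk1 hk2 => hmin k (by omega) hk2) (by omega) (by omega)

-- B's cols is the least c ≥ 1 with c*(c+1) ≥ n (for n ≥ 4)
theorem pvColsB_bracket (n : Int) (hn : 4 ≤ n) :
    let s : Int := (Nat.sqrt (4 * n + 1).toNat : Int)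
    let cols0 := PySem.Int.floordiv s 2
    let c := if cols0 * (cols0 + 1) < n then cols0 + 1 else cols0
    1 ≤ c ∧ c * (c + 1) ≥ n ∧ (c - 1) * c < n := by
  intro s cols0 c
  have hm : ((4 * n + 1).toNat : Int) = 4 * n + 1 := Int.toNat_of_nonneg (by omega)
  have hs0 : 0 ≤ s := Int.natCast_nonneg _
  have hlow : s * s ≤ 4 * n + 1 := by
    have h1 : ((Nat.sqrt (4 * n + 1).toNat * Nat.sqrt (4 * n + 1).toNat : Nat) : Int)
        ≤ ((4 * n + 1).toNat : Int) := by exact_mod_cast Nat.sqrt_le (4 * n + 1).toNat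
    push_cast at h1
    simpa [s, hm] using h1
  have hhigh : 4 * n + 1 < (s + 1) * (s + 1) := by
    have h1 : ((4 * n + 1).toNat : Int)
        < (((Nat.sqrt (4 * n + 1).toNat + 1) * (Nat.sqrt (4 * n + 1).toNat + 1) : Nat) : Int) := by
      exact_mod_cast Nat.lt_succ_sqrt (4 * n + 1).toNat
    push_cast at h1
    simpa [s, hm] using h1
  have hdiv : cols0 * 2 ≤ s ∧ s < (cols0 + 1) * 2 := by
    have h2 : (0:Int) < 2 := by norm_num
    have := (PySem.Int.floordiv_eq_iff_of_pos (a := s) (b := 2) (q := cols0) h2).mp rfl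
    exact this
  have hc0 : 2 ≤ cols0 := by nlinarith [hdiv.1, hdiv.2]
  by_cases hbr : cols0 * (cols0 + 1) < n
  · have hc : c = cols0 + 1 := if_pos hbr
    refine ⟨by omega, ?_, ?_⟩
    · -- (cols0+1)(cols0+2) ≥ n  from 4n+1 < (s+1)² ≤ (2cols0+2)²
      have hs1 : s + 1 ≤ 2 * cols0 + 2 := by omega
      nlinarith [hhigh, hs1, hs0]
    · rw [hc]; simpa using hbr
  · have hc : c = cols0 := if_neg hbr
    refine ⟨by omega, ?_, ?_⟩
    · rw [hc]; omega
    · -- (cols0-1)cols0 < n  from (2cols0)² ≤ s² ≤ 4n+1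
      have hs1 : 2 * cols0 ≤ s := by omega
      nlinarith [hlow, hs1, hc0]

theorem pv_main (n : Int) (hn : 4 ≤ n) :
    get_subplot_shape n = get_subplot_shape_alt n := by
  have hn3 : ¬ n ≤ 3 := by omega
  obtain ⟨hc1, hge, hlt⟩ := pvColsB_bracket n hn
  set s : Int := (Nat.sqrt (4 * n + 1).toNat : Int) with hs
  set cols0 := PySem.Int.floordiv s 2 with hcols0
  set c := if cols0 * (cols0 + 1) < n then cols0 + 1 else cols0 with hcdef
  -- B's rows equals pvCeilA n c
  have hBrows : -(PySem.Int.floordiv (-n) c) = pvCeilA n c := rfl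
  -- the test holds at c
  obtain ⟨hbl, hbu⟩ := pvCeilA_bracket n c (by omega)
  have hPc : pvCeilA n c * c ≥ n ∧ |pvCeilA n c - c| ≤ 1 := by
    constructor
    · exact hbu
    · rw [abs_le]
      constructor
      · -- pvCeilA n c ≥ c - 1 : from n ≤ r*c and (c-1)c < n  ⇒ (c-1)c < r*c ⇒ c-1 < r
        nlinarith [hbl, hbu, hlt, hc1]
      · -- pvCeilA n c ≤ c + 1 : from (r-1)c < n ≤ c(c+1) ⇒ (r-1)c < c(c+1) ⇒ r-1 < c+1
        nlinarith [hbl, hge, hc1]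
  -- the test fails below c
  have hmin : ∀ k, (1:Int) ≤ k → k < c →
      ¬ (pvCeilA n k * k ≥ n ∧ |pvCeilA n k - k| ≤ 1) := by
    intro k hk1 hkc ⟨_, habs⟩
    obtain ⟨hkl, hku⟩ := pvCeilA_bracket n k (by omega)
    -- k(k+1) ≤ (c-1)c < n, so n ≥ k(k+1)+1, hence ceil(n/k) ≥ k+2
    have hkk : k * (k + 1) < n := by nlinarith [hlt, hkc, hk1]
    have hr : k + 2 ≤ pvCeilA n k := by nlinarith [hkl, hkk, hk1]
    rw [abs_le] at habs
    omega
  --c fits in the fuel: c ≤ n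
  have hcn : c ≤ n := by nlinarith [hlt, hc1, hn]
  have hfuel : c - 1 < (n.toNat : Int) := by
    have : (n.toNat : Int) = n := Int.toNat_of_nonneg (by omega)
    omega
  have hA : get_subplot_shape n = (pvCeilA n c, c) := by
    simp only [get_subplot_shape, if_neg hn3]
    exact pvLoopA_spec n c hPc n.toNat 1 hmin (by omega) hfuel
  simp only [get_subplot_shape_alt, if_neg hn3]
  rw [hA, ← hs, ← hcols0, ← hcdef, hBrows]

-- ===== VERDICT (by name: the statement is the Claim_ definition above) =====
theorem get_subplot_shape_spec : Claim_equal_get_subplot_shape := by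
  intro n _
  unfold Spec_get_subplot_shape
  by_cases hn : n ≤ 3
  · simp [get_subplot_shape, get_subplot_shape_alt, hn]
  · exact pv_main n (by omega)
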